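-- pv_equiv track=rewrite | github.com/aorursy/new-nb-5 | mj9239_bert-some-features.py | bin_distance
-- ===== SOURCE A (Python) =====
-- def bin_distance(dist):
--
--     buckets = [1, 2, 3, 4, 5, 8, 16, 32, 64]
--     low, high = 0, len(buckets)
--     while low < high:
--         mid = low + int((high-low) / 2)
--         if dist > buckets[mid]:
--             low = mid + 1
--         elif dist < buckets[mid]:
--             high = mid
--         else:
--             return mid
--
--     return low
-- ===== SOURCE B (Python) =====
-- def bin_distance(dist):
--     buckets = [1, 2, 3, 4, 5, 8, 16, 32, 64]
--     return sum(1 for b in buckets if b < dist)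
-- ===== Notes on version B (the rewrite author's own statement) =====
-- stated objective: simpler
-- what changed: Replaced the hand-rolled binary search (low/high window) with a one-line count of buckets strictly below dist, which equals the binary-search result for all integer inputs.
import Mathlib
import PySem

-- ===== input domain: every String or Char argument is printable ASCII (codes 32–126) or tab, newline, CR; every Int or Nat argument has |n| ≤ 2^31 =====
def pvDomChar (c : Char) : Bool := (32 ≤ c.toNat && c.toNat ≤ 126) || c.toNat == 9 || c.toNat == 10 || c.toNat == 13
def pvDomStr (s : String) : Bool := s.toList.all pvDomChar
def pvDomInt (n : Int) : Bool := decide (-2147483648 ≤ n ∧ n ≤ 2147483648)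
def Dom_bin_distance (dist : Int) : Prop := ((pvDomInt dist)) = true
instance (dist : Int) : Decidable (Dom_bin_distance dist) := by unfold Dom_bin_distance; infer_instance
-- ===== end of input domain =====

-- B replaces A's binary search over the fixed bucket list with a single count of buckets strictly below dist (simpler; same values on all Int inputs).

-- ===== PORT A =====
def pvBucketsA : List Int := [1, 2, 3, 4, 5, 8, 16, 32, 64]

-- the while-loop of A: low, high window, midpoint probe; terminates because high - low shrinks
def pvLoopA (dist low high : Int) : Int :=
  if _h : low < high then
    let mid := low + PySem.Int.floordiv (high - low) 2
    match PySem.List.pyGet? pvBucketsA mid with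
    | none => 0  -- unreachable: mid always within [0, 9) when started from 0, 9
    | some b =>
      if dist > b then pvLoopA dist (mid + 1) high
      else if dist < b then pvLoopA dist low mid
      else mid
  else low
termination_by (high - low).toNat
decreasing_by
  all_goals
    have hd : PySem.Int.floordiv (high - low) 2 = (high - low) / 2 :=
      PySem.Int.floordiv_eq_ediv_of_pos (by omega)
    omega
def bin_distance (dist : Int) : Int := pvLoopA dist 0 (pvBucketsA.length : Int)

-- ===== PORT B =====
def bin_distance_alt (dist : Int) : Int :=
  (([1, 2, 3, 4, 5, 8, 16, 32, 64] : List Int).countP (fun b => b < dist) : Int)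

-- ===== PRECONDITION & SPEC =====
def Spec_bin_distance (dist : Int) (out : Int) : Prop := out = bin_distance_alt dist
instance (dist : Int) (out : Int) : Decidable (Spec_bin_distance dist out) := by unfold Spec_bin_distance; infer_instance

-- ===== CLAIM (what is proved, stated in full; the proofs are below) =====
def Claim_equal_bin_distance : Prop := ∀ (dist : Int), Dom_bin_distance dist → Spec_bin_distance dist (bin_distance dist)

-- ===== LEMMAS AND PROOFS =====

lemma pvL_0_0 (dist : Int) : pvLoopA dist 0 0 = 0 := by
  rw [pvLoopA]; norm_num

lemma pvL_1_1 (dist : Int) : pvLoopA dist 1 1 = 1 := by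
  rw [pvLoopA]; norm_num

lemma pvL_2_2 (dist : Int) : pvLoopA dist 2 2 = 2 := by
  rw [pvLoopA]; norm_num

lemma pvL_3_3 (dist : Int) : pvLoopA dist 3 3 = 3 := by
  rw [pvLoopA]; norm_num

lemma pvL_4_4 (dist : Int) : pvLoopA dist 4 4 = 4 := by
  rw [pvLoopA]; norm_num

lemma pvL_5_5 (dist : Int) : pvLoopA dist 5 5 = 5 := by
  rw [pvLoopA]; norm_num

lemma pvL_6_6 (dist : Int) : pvLoopA dist 6 6 = 6 := by
  rw [pvLoopA]; norm_num

lemma pvL_7_7 (dist : Int) : pvLoopA dist 7 7 = 7 := by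
  rw [pvLoopA]; norm_num

lemma pvL_8_8 (dist : Int) : pvLoopA dist 8 8 = 8 := by
  rw [pvLoopA]; norm_num

lemma pvL_9_9 (dist : Int) : pvLoopA dist 9 9 = 9 := by
  rw [pvLoopA]; norm_num

lemma pvL_0_9 (dist : Int) : pvLoopA dist 0 9 =
    (if 5 < dist then pvLoopA dist 5 9 else if dist < 5 then pvLoopA dist 0 4 else 4) := by
  rw [pvLoopA]
  norm_num [pvBucketsA, PySem.List.pyGet?, PySem.List.pyIdx?, PySem.Int.floordiv, Int.fdiv,
    show ((4:Int).toNat) = 4 from rfl, List.getElem_cons_succ, List.getElem_cons_zero]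

lemma pvL_5_9 (dist : Int) : pvLoopA dist 5 9 =
    (if 32 < dist then pvLoopA dist 8 9 else if dist < 32 then pvLoopA dist 5 7 else 7) := by
  rw [pvLoopA]
  norm_num [pvBucketsA, PySem.List.pyGet?, PySem.List.pyIdx?, PySem.Int.floordiv, Int.fdiv,
    show ((7:Int).toNat) = 7 from rfl, List.getElem_cons_succ, List.getElem_cons_zero]

lemma pvL_8_9 (dist : Int) : pvLoopA dist 8 9 =
    (if 64 < dist then pvLoopA dist 9 9 else if dist < 64 then pvLoopA dist 8 8 else 8) := by
  rw [pvLoopA]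
  norm_num [pvBucketsA, PySem.List.pyGet?, PySem.List.pyIdx?, PySem.Int.floordiv, Int.fdiv,
    show ((8:Int).toNat) = 8 from rfl, List.getElem_cons_succ, List.getElem_cons_zero]

lemma pvL_5_7 (dist : Int) : pvLoopA dist 5 7 =
    (if 16 < dist then pvLoopA dist 7 7 else if dist < 16 then pvLoopA dist 5 6 else 6) := by
  rw [pvLoopA]
  norm_num [pvBucketsA, PySem.List.pyGet?, PySem.List.pyIdx?, PySem.Int.floordiv, Int.fdiv,
    show ((6:Int).toNat) = 6 from rfl, List.getElem_cons_succ, List.getElem_cons_zero]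

lemma pvL_5_6 (dist : Int) : pvLoopA dist 5 6 =
    (if 8 < dist then pvLoopA dist 6 6 else if dist < 8 then pvLoopA dist 5 5 else 5) := by
  rw [pvLoopA]
  norm_num [pvBucketsA, PySem.List.pyGet?, PySem.List.pyIdx?, PySem.Int.floordiv, Int.fdiv,
    show ((5:Int).toNat) = 5 from rfl, List.getElem_cons_succ, List.getElem_cons_zero]

lemma pvL_0_4 (dist : Int) : pvLoopA dist 0 4 =
    (if 3 < dist then pvLoopA dist 3 4 else if dist < 3 then pvLoopA dist 0 2 else 2) := by
  rw [pvLoopA]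
  norm_num [pvBucketsA, PySem.List.pyGet?, PySem.List.pyIdx?, PySem.Int.floordiv, Int.fdiv,
    show ((2:Int).toNat) = 2 from rfl, List.getElem_cons_succ, List.getElem_cons_zero]

lemma pvL_3_4 (dist : Int) : pvLoopA dist 3 4 =
    (if 4 < dist then pvLoopA dist 4 4 else if dist < 4 then pvLoopA dist 3 3 else 3) := by
  rw [pvLoopA]
  norm_num [pvBucketsA, PySem.List.pyGet?, PySem.List.pyIdx?, PySem.Int.floordiv, Int.fdiv,
    show ((3:Int).toNat) = 3 from rfl, List.getElem_cons_succ, List.getElem_cons_zero]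

lemma pvL_0_2 (dist : Int) : pvLoopA dist 0 2 =
    (if 2 < dist then pvLoopA dist 2 2 else if dist < 2 then pvLoopA dist 0 1 else 1) := by
  rw [pvLoopA]
  norm_num [pvBucketsA, PySem.List.pyGet?, PySem.List.pyIdx?, PySem.Int.floordiv, Int.fdiv,
    show ((1:Int).toNat) = 1 from rfl, List.getElem_cons_succ, List.getElem_cons_zero]

lemma pvL_0_1 (dist : Int) : pvLoopA dist 0 1 =
    (if 1 < dist then pvLoopA dist 1 1 else if dist < 1 then pvLoopA dist 0 0 else 0) := by
  rw [pvLoopA]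
  norm_num [pvBucketsA, PySem.List.pyGet?, PySem.List.pyIdx?, PySem.Int.floordiv, Int.fdiv,
    show ((0:Int).toNat) = 0 from rfl, List.getElem_cons_succ, List.getElem_cons_zero]

-- ===== VERDICT (by name: the statement is the Claim_ definition above) =====
-- both programs equal the same closed-form bucket index (proof-local characterisation)
lemma pvAlt_closed (dist : Int) : bin_distance_alt dist = (if dist ≤ 1 then 0 else if dist ≤ 2 then 1 else if dist ≤ 3 then 2 else if dist ≤ 4 then 3 else if dist ≤ 5 then 4 else if dist ≤ 8 then 5 else if dist ≤ 16 then 6 else if dist ≤ 32 then 7 else if dist ≤ 64 then 8 else 9) := by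
  simp only [bin_distance_alt, List.countP_cons, List.countP_nil, decide_eq_true_eq]
  push_cast
  omega

lemma pvLoop_closed (dist : Int) : pvLoopA dist 0 9 = (if dist ≤ 1 then 0 else if dist ≤ 2 then 1 else if dist ≤ 3 then 2 else if dist ≤ 4 then 3 else if dist ≤ 5 then 4 else if dist ≤ 8 then 5 else if dist ≤ 16 then 6 else if dist ≤ 32 then 7 else if dist ≤ 64 then 8 else 9) := by
  simp only [pvL_0_0, pvL_1_1, pvL_2_2, pvL_3_3, pvL_4_4, pvL_5_5, pvL_6_6, pvL_7_7, pvL_8_8, pvL_9_9, pvL_0_9, pvL_5_9, pvL_8_9, pvL_5_7, pvL_5_6, pvL_0_4, pvL_3_4, pvL_0_2, pvL_0_1]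
  omega

theorem bin_distance_spec : Claim_equal_bin_distance := by
  intro dist _
  simp only [Spec_bin_distance, bin_distance]
  have hlen : ((pvBucketsA.length : Nat) : Int) = 9 := by norm_num [pvBucketsA]
  rw [hlen, pvLoop_closed, pvAlt_closed]
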